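-- pv_equiv track=rewrite | github.com/CGATOxford/cgat | scripts/optic/prune_multiple_alignment.py | GetFrameColumns
-- ===== SOURCE A (Python) =====
-- def GetFrameColumns(mali, master, gap_chars="-."):
--     """get columns in frame according to master."""
--
--     columns = []
--     try:
--         sequence = mali[master]
--     except KeyError:
--         return columns
--
--     x = 0
--     t = 0
--     while x < len(sequence):
--         c = 0
--         codon = []
--         while x < len(sequence) and c < 3:
--             # and sequence[x] in string.uppercase:
--             if sequence[x] not in gap_chars:
--                 codon.append(x)
--                 c += 1
--                 t += 1
--             x += 1
--
--         if len(codon) == 3: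
--             columns.append(codon)
--
--     if t % 3 != 0:
--         raise "master %s has length %i, which is not divisible by 3" % (
--             master, t)
--
--     return columns
-- ===== SOURCE B (Python) =====
-- def GetFrameColumns(mali, master, gap_chars="-."):
--     """get columns in frame according to master."""
--     sequence = mali.get(master)
--     if sequence is None:
--         return []
--     indices = [i for i, ch in enumerate(sequence) if ch not in gap_chars]
--     t = len(indices)
--     if t % 3 != 0:
--         raise ValueError(
--             "master %s has length %i, which is not divisible by 3" % (master, t))
--     return [indices[i:i + 3] for i in range(0, t, 3)]
-- ===== Notes on version B (the rewrite author's own statement) =====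
-- stated objective: simpler
-- what changed: Replaces the nested while-loops that interleave scanning, codon building and counting with two separate passes: a comprehension collecting non-gap indices, then slicing that list into codons of three.
import Mathlib
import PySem

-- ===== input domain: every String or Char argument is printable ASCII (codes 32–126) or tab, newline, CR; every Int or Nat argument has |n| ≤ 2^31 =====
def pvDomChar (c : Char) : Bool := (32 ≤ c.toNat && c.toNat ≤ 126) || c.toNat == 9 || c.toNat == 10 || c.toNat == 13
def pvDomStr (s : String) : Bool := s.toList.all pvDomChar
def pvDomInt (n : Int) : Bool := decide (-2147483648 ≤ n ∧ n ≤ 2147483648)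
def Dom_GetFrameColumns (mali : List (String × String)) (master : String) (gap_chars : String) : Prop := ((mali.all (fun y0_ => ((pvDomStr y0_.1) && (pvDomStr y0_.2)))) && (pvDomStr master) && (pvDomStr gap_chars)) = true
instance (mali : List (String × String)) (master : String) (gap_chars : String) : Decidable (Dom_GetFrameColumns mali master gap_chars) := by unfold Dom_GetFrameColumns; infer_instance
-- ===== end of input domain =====

-- One honest line: B collects the non-gap indices in one comprehension and then slices
-- them into codons of three, instead of A's nested while-loops; objective: simpler.

-- ===== PORT A =====
-- inner 'while x < len(sequence) and c < 3' loop: state (rest-of-sequence, x, c, codon, t)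
def pvInnerA (gaps : List Char) : List Char → Int → Nat → List Int → Nat → (List Char × Int × List Int × Nat)
  | [], x, _, codon, t => ([], x, codon, t)
  | ch :: rest, x, c, codon, t =>
    if c < 3 then
      if !(gaps.contains ch) then pvInnerA gaps rest (x + 1) (c + 1) (codon ++ [x]) (t + 1)
      else pvInnerA gaps rest (x + 1) c codon t
    else (ch :: rest, x, codon, t)

theorem pvInnerA_length_le (gaps : List Char) (l : List Char) (x : Int) (c : Nat)
    (codon : List Int) (t : Nat) : (pvInnerA gaps l x c codon t).1.length ≤ l.length := by
  induction l generalizing x c codon t with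
  | nil => simp [pvInnerA]
  | cons ch rest ih =>
    simp only [pvInnerA]
    split
    · split
      · exact Nat.le_succ_of_le (ih _ _ _ _)
      · exact Nat.le_succ_of_le (ih _ _ _ _)
    · simp

-- outer 'while x < len(sequence)' loop
def pvOuterA (gaps : List Char) : List Char → Int → List (List Int) → Nat → (List (List Int) × Nat)
  | [], _, columns, t => (columns, t)
  | ch :: rest, x, columns, t =>
    let r := pvInnerA gaps (ch :: rest) x 0 [] t
    pvOuterA gaps r.1 r.2.1 (if r.2.2.1.length = 3 then columns ++ [r.2.2.1] else columns) r.2.2.2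
termination_by l => l.length
decreasing_by
  simp only [pvInnerA, if_pos (by norm_num : (0 : Nat) < 3)]
  split
  · exact Nat.lt_succ_of_le (pvInnerA_length_le gaps rest (x + 1) (0 + 1) ([] ++ [x]) (t + 1))
  · exact Nat.lt_succ_of_le (pvInnerA_length_le gaps rest (x + 1) 0 [] t)

-- 'mali[master]' with the KeyError guard, then the two while-loops; the final
-- 't % 3 != 0' raise is excluded by Pre_GetFrameColumns, so the port returns columns.
def GetFrameColumns (mali : List (String × String)) (master : String) (gap_chars : String) : List (List Int) :=
  match (mali.find? (fun p => p.1 == master)).map (fun p => p.2) with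
  | none => []
  | some sequence => (pvOuterA gap_chars.toList sequence.toList 0 [] 0).1

-- ===== PORT B =====
def GetFrameColumns_alt (mali : List (String × String)) (master : String) (gap_chars : String) : List (List Int) :=
  match (mali.find? (fun p => p.1 == master)).map (fun p => p.2) with
  | none => []
  | some sequence =>
    let indices := ((PySem.List.enumerate sequence.toList).filter
      (fun p => !(gap_chars.toList.contains p.2))).map (fun p => p.1)
    let t : Int := (indices.length : Int)
    (PySem.List.pyRange 0 t 3).map (fun i => PySem.List.slice indices (some i) (some (i + 3)))

-- ===== PRECONDITION & SPEC =====
-- Pre_ excludes exactly the inputs on which A raises: master present and the number of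
-- non-gap characters in its sequence not divisible by 3 (B also raises there).
def Pre_GetFrameColumns (mali : List (String × String)) (master : String) (gap_chars : String) : Prop :=
  ((mali.find? (fun p => p.1 == master)).all
    (fun p => p.2.toList.countP (fun ch => !(gap_chars.toList.contains ch)) % 3 == 0)) = true
instance (mali : List (String × String)) (master : String) (gap_chars : String) : Decidable (Pre_GetFrameColumns mali master gap_chars) := by unfold Pre_GetFrameColumns; infer_instance

def pvWitness_GetFrameColumns : (List (String × String)) × String × String := ([("m", "AC-G.")], "m", "-.")

def Spec_GetFrameColumns (mali : List (String × String)) (master : String) (gap_chars : String) (out : List (List Int)) : Prop := out = GetFrameColumns_alt mali master gap_chars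
instance (mali : List (String × String)) (master : String) (gap_chars : String) (out : List (List Int)) : Decidable (Spec_GetFrameColumns mali master gap_chars out) := by unfold Spec_GetFrameColumns; infer_instance

-- ===== CLAIM (what is proved, stated in full; the proofs are below) =====
def Claim_equal_GetFrameColumns : Prop := ∀ (mali : List (String × String)) (master : String) (gap_chars : String), Dom_GetFrameColumns mali master gap_chars → Pre_GetFrameColumns mali master gap_chars → Spec_GetFrameColumns mali master gap_chars (GetFrameColumns mali master gap_chars)

-- ===== LEMMAS AND PROOFS =====

-- the non-gap positions of l, counting from x
def nonGapIdx (gaps : List Char) : List Char → Int → List Int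
  | [], _ => []
  | ch :: rest, x =>
    if !(gaps.contains ch) then x :: nonGapIdx gaps rest (x + 1) else nonGapIdx gaps rest (x + 1)

-- full groups of three, dropping a trailing partial group
def chunk3 : List Int → List (List Int)
  | a :: b :: c :: rest => [a, b, c] :: chunk3 rest
  | _ => []

theorem pvInnerA_spec (gaps : List Char) (l : List Char) (x : Int) (c : Nat)
    (codon : List Int) (t : Nat) (hc : c ≤ 3) :
    (pvInnerA gaps l x c codon t).2.2.1 = codon ++ (nonGapIdx gaps l x).take (3 - c) ∧
    nonGapIdx gaps (pvInnerA gaps l x c codon t).1 (pvInnerA gaps l x c codon t).2.1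
      = (nonGapIdx gaps l x).drop (3 - c) := by
  induction l generalizing x c codon t with
  | nil => simp [pvInnerA, nonGapIdx]
  | cons ch rest ih =>
    by_cases h3 : c < 3
    · by_cases hg : ch ∈ gaps
      · have hE : pvInnerA gaps (ch :: rest) x c codon t = pvInnerA gaps rest (x + 1) c codon t := by
          simp [pvInnerA, if_pos h3, hg]
        have hN : nonGapIdx gaps (ch :: rest) x = nonGapIdx gaps rest (x + 1) := by
          simp [nonGapIdx, hg]
        rw [hE, hN]
        exact ih (x + 1) (c := c) codon t hc
      · have hE : pvInnerA gaps (ch :: rest) x c codon t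
            = pvInnerA gaps rest (x + 1) (c + 1) (codon ++ [x]) (t + 1) := by
          simp [pvInnerA, if_pos h3, hg]
        have hN : nonGapIdx gaps (ch :: rest) x = x :: nonGapIdx gaps rest (x + 1) := by
          simp [nonGapIdx, hg]
        obtain ⟨ha, hb⟩ := ih (x + 1) (c := c + 1) (codon ++ [x]) (t + 1) h3
        have hsub : 3 - c = (3 - (c + 1)) + 1 := by omega
        rw [hE, hN]
        constructor
        · rw [ha, hsub, List.take_succ_cons, List.append_assoc, List.singleton_append]
        · rw [hb, hsub, List.drop_succ_cons]
    · have hc3 : c = 3 := by omega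
      simp [pvInnerA, hc3]

theorem pvOuterA_spec (gaps : List Char) (n : Nat) :
    ∀ (l : List Char), l.length ≤ n → ∀ (x : Int) (columns : List (List Int)) (t : Nat),
    (pvOuterA gaps l x columns t).1 = columns ++ chunk3 (nonGapIdx gaps l x) := by
  induction n with
  | zero =>
    intro l hl x columns t
    have : l = [] := List.eq_nil_of_length_eq_zero (by omega)
    subst this; simp [pvOuterA, nonGapIdx, chunk3]
  | succ m ih =>
    intro l hl x columns t
    match l with
    | [] => simp [pvOuterA, nonGapIdx, chunk3]
    | ch :: rest =>
      obtain ⟨ha, hb⟩ := pvInnerA_spec gaps (ch :: rest) x 0 [] t (by omega)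
      rw [pvOuterA]
      have hlen : (pvInnerA gaps (ch :: rest) x 0 [] t).1.length ≤ m := by
        have h1 : (pvInnerA gaps (ch :: rest) x 0 [] t).1.length ≤ rest.length := by
          simp only [pvInnerA]
          split
          · split
            · exact pvInnerA_length_le gaps rest (x + 1) 1 [x] (t + 1)
            · exact pvInnerA_length_le gaps rest (x + 1) 0 [] t
          · omega
        simp only [List.length_cons] at hl; omega
      rw [ih _ hlen]
      simp only [List.nil_append] at ha
      rw [hb, ha]
      match hF : nonGapIdx gaps (ch :: rest) x with
      | a :: b :: c :: fs =>
        simp [chunk3, List.take, List.drop]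
      | [] => simp [chunk3, List.take, List.drop]
      | [a] => simp [chunk3, List.take, List.drop]
      | [a, b] => simp [chunk3, List.take, List.drop]

theorem indices_eq_nonGapIdx (gaps : List Char) (l : List Char) (x : Int) :
    ((PySem.List.enumerate l x).filter (fun p => !(gaps.contains p.2))).map (fun p => p.1)
      = nonGapIdx gaps l x := by
  induction l generalizing x with
  | nil => simp [PySem.List.enumerate, nonGapIdx]
  | cons ch rest ih =>
    simp only [PySem.List.enumerate, nonGapIdx, List.filter]
    by_cases hg : ch ∈ gaps
    · simp [hg]
      simpa using ih (x + 1)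
    · simp [hg]
      simpa using ih (x + 1)

theorem nonGapIdx_length (gaps : List Char) (l : List Char) (x : Int) :
    (nonGapIdx gaps l x).length = l.countP (fun ch => !(gaps.contains ch)) := by
  induction l generalizing x with
  | nil => simp [nonGapIdx]
  | cons ch rest ih =>
    simp only [nonGapIdx, List.countP_cons]
    by_cases hg : ch ∈ gaps
    · simp [hg]
      simpa using ih (x + 1)
    · simp [hg]
      simpa using ih (x + 1)

theorem slice_natCast' {α : Type} (xs : List α) (a b : Nat) :
    PySem.List.slice xs (some (a : Int)) (some (b : Int))
      = List.take (min b xs.length - min a xs.length) (List.drop (min a xs.length) xs) := by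
  simp only [PySem.List.slice, PySem.List.clampIdx]
  rw [if_neg (by omega), if_neg (by omega)]
  simp

theorem slice_chunks (k : Nat) : ∀ (xs : List Int), xs.length = 3 * k →
    (List.range k).map (fun j : Nat => PySem.List.slice xs (some (3 * (j : Int))) (some (3 * (j : Int) + 3)))
      = chunk3 xs := by
  induction k with
  | zero =>
    intro xs hxs
    have : xs = [] := List.eq_nil_of_length_eq_zero (by omega)
    subst this; simp [chunk3]
  | succ m ih =>
    intro xs hxs
    match xs with
    | [] => simp at hxs
    | [a] => simp at hxs; omega
    | [a, b] => simp at hxs; omega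
    | a :: b :: c :: rest =>
      have hrest : rest.length = 3 * m := by simp at hxs; omega
      rw [List.range_succ_eq_map]
      simp only [chunk3, List.map_cons, List.map_map, List.cons.injEq]
      refine ⟨?_, ?_⟩
      · -- head: slice xs 0 3 = [a,b,c]
        simp [PySem.List.slice, PySem.List.clampIdx]
      · -- tail: shift by one codon
        rw [← ih rest hrest]
        apply List.map_congr_left
        intro j hj
        simp only [Function.comp]
        have h1 : (3 * ((j : Int) + 1)) = ((3 * j + 3 : Nat) : Int) := by push_cast; ring
        have h2 : (((3 * j + 3 : Nat) : Int) + 3) = ((3 * j + 6 : Nat) : Int) := by push_cast; ring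
        have h3 : (3 * (j : Int)) = ((3 * j : Nat) : Int) := by push_cast; ring
        have h4 : (((3 * j : Nat) : Int) + 3) = ((3 * j + 3 : Nat) : Int) := by push_cast; ring
        simp only [Nat.succ_eq_add_one, Nat.cast_add, Nat.cast_one]
        rw [h1, h2, h3, h4]
        rw [slice_natCast', slice_natCast']
        have hj' : j < m := List.mem_range.mp hj
        have hlen : (a :: b :: c :: rest).length = 3 * m + 3 := by simp [hrest]
        rw [hlen, hrest]
        have e1 : min (3 * j + 3) (3 * m + 3) = 3 * j + 3 := by omega
        have e2 : min (3 * j + 6) (3 * m + 3) = 3 * j + 6 := by omega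
        have e3 : min (3 * j) (3 * m) = 3 * j := by omega
        have e4 : min (3 * j + 3) (3 * m) = 3 * j + 3 := by omega
        rw [e1, e2, e3, e4]
        have e5 : 3 * j + 6 - (3 * j + 3) = 3 := by omega
        have e6 : 3 * j + 3 - 3 * j = 3 := by omega
        rw [e5, e6]
        have e7 : 3 * j + 3 = (3 * j + 2) + 1 := by omega
        rw [e7, List.drop_succ_cons]
        have e8 : 3 * j + 2 = (3 * j + 1) + 1 := by omega
        rw [e8, List.drop_succ_cons]
        rw [List.drop_succ_cons]

theorem pyRange_three (k : Nat) :
    PySem.List.pyRange 0 ((3 * k : Nat) : Int) 3 = (List.range k).map (fun j : Nat => 3 * (j : Int)) := by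
  rw [PySem.List.pyRange_of_pos 0 ((3 * k : Nat) : Int) (by norm_num)]
  by_cases hk : 0 < k
  · have hlt : (0 : Int) < ((3 * k : Nat) : Int) := by push_cast; omega
    rw [if_pos hlt]
    have : ((((3 * k : Nat) : Int) - 0 + 3 - 1) / 3).toNat = k := by
      have : (((3 * k : Nat) : Int) - 0 + 3 - 1) = 3 * (k : Int) + 2 := by push_cast; ring
      rw [this]
      have : (3 * (k : Int) + 2) / 3 = (k : Int) := by omega
      rw [this]; simp
    rw [this]
    apply List.map_congr_left
    intro j _
    ring
  · have hk0 : k = 0 := by omega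
    subst hk0; simp

-- ===== VERDICT (by name: the statement is the Claim_ definition above) =====
theorem GetFrameColumns_spec : Claim_equal_GetFrameColumns := by
  intro mali master gap_chars _hDom hPre
  unfold Spec_GetFrameColumns GetFrameColumns GetFrameColumns_alt
  unfold Pre_GetFrameColumns at hPre
  cases hfind : mali.find? (fun p => p.1 == master) with
  | none => simp
  | some p =>
    rw [hfind] at hPre
    simp only [Option.all_some, beq_iff_eq] at hPre
    simp only [Option.map_some]
    rw [pvOuterA_spec gap_chars.toList p.2.toList.length p.2.toList le_rfl 0 [] 0]
    rw [indices_eq_nonGapIdx]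
    set F := nonGapIdx gap_chars.toList p.2.toList 0 with hF
    have hlen : F.length = 3 * (F.length / 3) := by
      rw [hF, nonGapIdx_length]
      omega
    rw [List.nil_append]
    conv_rhs => rw [show (F.length : Int) = ((3 * (F.length / 3) : Nat) : Int) by rw [← hlen]]
    rw [pyRange_three, List.map_map]
    rw [← slice_chunks (F.length / 3) F hlen]
    apply List.map_congr_left
    intro j _
    simp [Function.comp]
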